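-- pv_equiv track=rewrite | github.com/RenanOliveira43/MC102 | lab08 - Copy.py | categoria_especial_2
-- ===== SOURCE A (Python) =====
-- def categoria_especial_2(dicionario, lista):
--     filme_sem_avaliacao = []
--     lista_aux = []
--     for categoria, lista_filmes in dicionario.items():
--         for filme in lista:
--             if filme in lista_filmes:
--                 lista_aux.append(filme)
--
--     for x in lista:
--         if x not in lista_aux:
--             filme_sem_avaliacao.append(x)
--
--     if len(filme_sem_avaliacao) == 0:
--         return ['sem ganhadores']
--     else:
--         return filme_sem_avaliacao
-- ===== SOURCE B (Python) =====
-- def categoria_especial_2(dicionario, lista):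
--     filme_sem_avaliacao = [
--         filme for filme in lista
--         if not any(filme in lista_filmes for lista_filmes in dicionario.values())
--     ]
--     if not filme_sem_avaliacao:
--         return ['sem ganhadores']
--     return filme_sem_avaliacao
-- ===== Notes on version B (the rewrite author's own statement) =====
-- stated objective: simpler
-- what changed: Drops the auxiliary lista_aux list and its dict-by-lista double loop; one comprehension over lista keeps each film no category list contains (any over dicionario.values()), sentinel check unchanged.
import Mathlib
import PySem

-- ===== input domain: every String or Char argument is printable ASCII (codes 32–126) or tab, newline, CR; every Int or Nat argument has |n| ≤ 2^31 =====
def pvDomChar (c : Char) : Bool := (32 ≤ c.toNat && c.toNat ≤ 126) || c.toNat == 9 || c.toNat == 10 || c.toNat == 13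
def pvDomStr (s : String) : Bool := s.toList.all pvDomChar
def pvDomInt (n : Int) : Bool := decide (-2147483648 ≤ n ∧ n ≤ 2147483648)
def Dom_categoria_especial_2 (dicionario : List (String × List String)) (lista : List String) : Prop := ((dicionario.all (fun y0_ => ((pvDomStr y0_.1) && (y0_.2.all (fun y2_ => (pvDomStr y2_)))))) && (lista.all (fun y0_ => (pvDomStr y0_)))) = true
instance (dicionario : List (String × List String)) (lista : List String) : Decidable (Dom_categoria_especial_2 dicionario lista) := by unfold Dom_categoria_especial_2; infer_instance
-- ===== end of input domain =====

-- ===== PORT A =====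
-- B drops A's auxiliary list: one pass over lista testing membership in any category's list; return value only, A mutates nothing.
def categoria_especial_2 (dicionario : List (String × List String)) (lista : List String) : List String :=
  -- for categoria, lista_filmes in dicionario.items(): for filme in lista: if filme in lista_filmes: lista_aux.append(filme)
  let lista_aux : List String :=
    dicionario.foldl (fun acc p =>
      lista.foldl (fun acc2 filme =>
        if p.2.contains filme then acc2 ++ [filme] else acc2) acc) []
  -- for x in lista: if x not in lista_aux: filme_sem_avaliacao.append(x)
  let filme_sem_avaliacao : List String :=
    lista.foldl (fun acc x =>
      if lista_aux.contains x then acc else acc ++ [x]) []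
  if filme_sem_avaliacao.length = 0 then ["sem ganhadores"] else filme_sem_avaliacao

-- ===== PORT B =====
def categoria_especial_2_alt (dicionario : List (String × List String)) (lista : List String) : List String :=
  let res : List String :=
    lista.filter (fun filme =>
      !(dicionario.map Prod.snd).any (fun lista_filmes => lista_filmes.contains filme))
  if res.isEmpty then ["sem ganhadores"] else res

-- ===== PRECONDITION & SPEC =====
def Spec_categoria_especial_2 (dicionario : List (String × List String)) (lista : List String) (out : List String) : Prop := out = categoria_especial_2_alt dicionario lista
instance (dicionario : List (String × List String)) (lista : List String) (out : List String) : Decidable (Spec_categoria_especial_2 dicionario lista out) := by unfold Spec_categoria_especial_2; infer_instance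

-- ===== CLAIM (what is proved, stated in full; the proofs are below) =====
def Claim_equal_categoria_especial_2 : Prop := ∀ (dicionario : List (String × List String)) (lista : List String), Dom_categoria_especial_2 dicionario lista → Spec_categoria_especial_2 dicionario lista (categoria_especial_2 dicionario lista)

-- ===== LEMMAS AND PROOFS =====

-- ===== VERDICT (by name: the statement is the Claim_ definition above) =====
-- lista_aux contains x (for x drawn from lista) iff some category list contains x
lemma pv_aux_mem (dicionario : List (String × List String)) (lista : List String)
    (acc : List String) :
    dicionario.foldl (fun acc p =>
      lista.foldl (fun acc2 filme =>
        if p.2.contains filme then acc2 ++ [filme] else acc2) acc) acc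
    = acc ++ dicionario.flatMap (fun p => lista.filter (fun f => p.2.contains f)) := by
  induction dicionario generalizing acc with
  | nil => simp
  | cons p tl ih =>
    simp only [List.foldl_cons, List.flatMap_cons]
    rw [PySem.List.foldl_append_if_eq_filter, ih, List.append_assoc]

lemma pv_second_loop (aux : List String) (lista : List String) :
    lista.foldl (fun acc x => if aux.contains x then acc else acc ++ [x]) []
    = lista.filter (fun x => !aux.contains x) := by
  have := PySem.List.foldl_append_if_eq_filter (l := lista)
      (p := fun x => !aux.contains x) (acc := ([] : List String))
  simpa using this

theorem categoria_especial_2_spec : Claim_equal_categoria_especial_2 := by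
  intro dicionario lista _
  unfold Spec_categoria_especial_2 categoria_especial_2 categoria_especial_2_alt
  simp only [pv_aux_mem, List.nil_append, pv_second_loop]
  have hf : lista.filter (fun x =>
        !(dicionario.flatMap (fun p => lista.filter (fun f => p.2.contains f))).contains x)
      = lista.filter (fun filme =>
        !(dicionario.map Prod.snd).any (fun lf => lf.contains filme)) := by
    apply List.filter_congr
    intro x hx
    simp only [Bool.not_eq_eq_eq_not, Bool.not_not]
    simp only [List.contains_eq_mem, List.mem_flatMap, List.mem_filter]
    rw [Bool.eq_iff_iff]
    simp only [decide_eq_true_eq, List.any_eq_true, List.mem_map]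
    constructor
    · rintro ⟨p, hp, _, hm⟩
      exact ⟨p.2, ⟨p, hp, rfl⟩, hm⟩
    · rintro ⟨lf, ⟨p, hp, rfl⟩, hm⟩
      exact ⟨p, hp, hx, hm⟩
  rw [hf]
  rcases h : lista.filter (fun filme =>
      !(dicionario.map Prod.snd).any (fun lf => lf.contains filme)) with _ | _ <;> simp
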